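-- pv_equiv track=rewrite | github.com/joey-david/py-scripts | chatbrain/backend/chat_shrinker.py | create_nickname
-- ===== SOURCE A (Python) =====
-- def create_nickname(name, used):
--     i = 1
--     while i <= len(name):
--         candidate = name[:i]
--         if candidate not in used:
--             return candidate
--         i += 1
--     idx = 2
--     candidate = name
--     while candidate in used:
--         candidate = f"{name}{idx}"
--         idx += 1
--     return candidate
-- ===== SOURCE B (Python) =====
-- def create_nickname(name, used):
--     # One pass over `used` builds an index of what is taken relative to `name`:
--     # which prefix lengths of `name` occur in `used`, and which suffix strings
--     # follow `name` in entries of `used`. Then pick the smallest free prefix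
--     # length, else the bare name, else the smallest free numeric suffix.
--     taken_lens = set()
--     suffixes = set()
--     for u in used:
--         if name.startswith(u):
--             taken_lens.add(len(u))
--         if u.startswith(name):
--             suffixes.add(u[len(name):])
--     for i in range(1, len(name) + 1):
--         if i not in taken_lens:
--             return name[:i]
--     if '' not in suffixes:
--         return name
--     idx = 2
--     while str(idx) in suffixes:
--         idx += 1
--     return f"{name}{idx}"
-- ===== Notes on version B (the rewrite author's own statement) =====
-- stated objective: alternative
-- what changed: Instead of A's candidate-by-candidate membership scans of `used` (prefix loop, then numbered-suffix retry loop), B makes one pass over `used` building an inverted index -- the set of prefix lengths of `name` occurring in `used` and the set of suffix strings following `name` in entries of `used` -- and then reads the answer off that index: smallest free prefix length, else the bare name, else the smallest free numeric suffix.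
import Mathlib
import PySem

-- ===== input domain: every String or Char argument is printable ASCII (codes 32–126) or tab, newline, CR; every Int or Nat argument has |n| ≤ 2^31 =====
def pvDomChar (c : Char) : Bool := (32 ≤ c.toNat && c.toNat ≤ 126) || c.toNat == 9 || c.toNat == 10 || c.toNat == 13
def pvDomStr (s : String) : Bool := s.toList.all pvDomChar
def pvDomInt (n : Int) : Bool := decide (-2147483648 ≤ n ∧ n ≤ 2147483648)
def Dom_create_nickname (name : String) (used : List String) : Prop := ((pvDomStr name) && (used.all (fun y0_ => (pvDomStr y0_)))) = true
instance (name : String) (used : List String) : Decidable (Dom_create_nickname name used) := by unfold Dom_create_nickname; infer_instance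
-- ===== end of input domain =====

-- B inverts A's candidate-by-candidate scan of `used`: one pass over `used` builds an index
-- (the taken prefix lengths of `name`, and the taken suffix strings after `name`), then the
-- answer is read off that index; objective: alternative decomposition, same asymptotic cost.

-- ===== PORT A =====
-- first while-loop of A: i walks 1..len(name), returns the first free prefix (none if the loop falls through)
def cnLoop1 (name : String) (used : List String) (i : Nat) : Option String :=
  if i ≤ name.length then
    let candidate := PySem.Str.slice name none (some (i : Int))
    if candidate ∈ used then cnLoop1 name used (i + 1) else some candidate
  else none
termination_by name.length + 1 - i

-- second while-loop of A; fuel used.length + 1 bounds the iterations (the candidates tested are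
-- pairwise distinct, so the loop exits within that many tests)
def cnLoop2 (name : String) (used : List String) (candidate : String) (idx : Int) : Nat → String
  | 0 => candidate
  | f + 1 =>
    if candidate ∈ used then
      cnLoop2 name used (name ++ PySem.Int.toStr idx) (idx + 1) f
    else candidate

def create_nickname (name : String) (used : List String) : String :=
  match cnLoop1 name used 1 with
  | some c => c
  | none => cnLoop2 name used name 2 (used.length + 1)

-- ===== PORT B =====
-- B's single pass over `used`: the set of prefix lengths of `name` occurring in `used`,
-- and the set of suffix strings following `name` in entries of `used`
def altIndex (name : String) (used : List String) : PySem.Set Int × PySem.Set String :=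
  used.foldl (fun st u =>
    let st1 := if PySem.Str.startswith name u then (PySem.Set.add st.1 (PySem.Str.len u), st.2) else st
    if PySem.Str.startswith u name then
      (st1.1, PySem.Set.add st1.2 (PySem.Str.slice u (some (PySem.Str.len name)) none))
    else st1)
    (PySem.Set.empty, PySem.Set.empty)

-- B's final while-loop: first idx (counting from the given one) with str(idx) not a taken suffix;
-- fuel used.length bounds the iterations (the tested suffixes are pairwise distinct)
def altNum (name : String) (suffixes : PySem.Set String) (idx : Int) : Nat → String
  | 0 => name ++ PySem.Int.toStr idx
  | f + 1 =>
    if PySem.Set.contains suffixes (PySem.Int.toStr idx) then altNum name suffixes (idx + 1) f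
    else name ++ PySem.Int.toStr idx

def create_nickname_alt (name : String) (used : List String) : String :=
  let idxp := altIndex name used
  match (PySem.List.pyRange 1 (PySem.Str.len name + 1) 1).find?
      (fun i => !(PySem.Set.contains idxp.1 i)) with
  | some i => PySem.Str.slice name none (some i)
  | none =>
    if PySem.Set.contains idxp.2 "" then altNum name idxp.2 2 used.length
    else name

-- ===== PRECONDITION & SPEC =====
def Spec_create_nickname (name : String) (used : List String) (out : String) : Prop := out = create_nickname_alt name used
instance (name : String) (used : List String) (out : String) : Decidable (Spec_create_nickname name used out) := by unfold Spec_create_nickname; infer_instance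

-- ===== CLAIM =====
def Claim_equal_create_nickname : Prop := ∀ (name : String) (used : List String), Dom_create_nickname name used → Spec_create_nickname name used (create_nickname name used)

-- ===== LEMMAS AND PROOFS =====

-- membership in the two folded sets, characterised over `used`
set_option maxHeartbeats 1000000 in
theorem altIndex_go (name : String) (used : List String) (st : PySem.Set Int × PySem.Set String) :
    (∀ x, x ∈ (used.foldl (fun st u =>
        let st1 := if PySem.Str.startswith name u then (PySem.Set.add st.1 (PySem.Str.len u), st.2) else st
        if PySem.Str.startswith u name then
          (st1.1, PySem.Set.add st1.2 (PySem.Str.slice u (some (PySem.Str.len name)) none))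
        else st1) st).1 ↔
      x ∈ st.1 ∨ ∃ u ∈ used, PySem.Str.startswith name u = true ∧ x = PySem.Str.len u) ∧
    (∀ s, s ∈ (used.foldl (fun st u =>
        let st1 := if PySem.Str.startswith name u then (PySem.Set.add st.1 (PySem.Str.len u), st.2) else st
        if PySem.Str.startswith u name then
          (st1.1, PySem.Set.add st1.2 (PySem.Str.slice u (some (PySem.Str.len name)) none))
        else st1) st).2 ↔
      s ∈ st.2 ∨ ∃ u ∈ used,
        PySem.Str.startswith u name = true ∧ s = PySem.Str.slice u (some (PySem.Str.len name)) none) := by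
  induction used generalizing st with
  | nil => simp
  | cons u rest ih =>
    simp only [List.foldl_cons]
    constructor
    · intro x
      rw [(ih _).1]
      simp only [PySem.Str.startswith_eq]
      by_cases h1 : PySem.Chars.startswith name.toList u.toList = true <;>
        by_cases h2 : PySem.Chars.startswith u.toList name.toList = true <;>
        simp only [h1, h2, if_true, if_false, Bool.false_eq_true, PySem.Set.mem_add,
          List.mem_cons, exists_eq_or_imp] <;> tauto
    · intro s
      rw [(ih _).2]
      simp only [PySem.Str.startswith_eq]
      by_cases h1 : PySem.Chars.startswith name.toList u.toList = true <;>
        by_cases h2 : PySem.Chars.startswith u.toList name.toList = true <;>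
        simp only [h1, h2, if_true, if_false, Bool.false_eq_true, PySem.Set.mem_add,
          List.mem_cons, exists_eq_or_imp] <;> tauto

theorem mem_altIndex_fst (name : String) (used : List String) (x : Int) :
    x ∈ (altIndex name used).1 ↔ ∃ u ∈ used, PySem.Str.startswith name u = true ∧ x = PySem.Str.len u := by
  have := (altIndex_go name used (PySem.Set.empty, PySem.Set.empty)).1 x
  simpa [altIndex, PySem.Set.empty] using this

theorem mem_altIndex_snd (name : String) (used : List String) (s : String) :
    s ∈ (altIndex name used).2 ↔ ∃ u ∈ used,
      PySem.Str.startswith u name = true ∧ s = PySem.Str.slice u (some (PySem.Str.len name)) none := by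
  have := (altIndex_go name used (PySem.Set.empty, PySem.Set.empty)).2 s
  simpa [altIndex, PySem.Set.empty] using this

-- the string slice name[:j] is the take of the character list
theorem slice_toList (name : String) (j : Nat) :
    (PySem.Str.slice name none (some (j : Int))).toList = name.toList.take j := by
  simp [PySem.Str.slice, PySem.List.slice_to_natCast]

-- the string slice u[len(name):] is the drop of the character list
theorem sliceFrom_toList (u name : String) :
    (PySem.Str.slice u (some (PySem.Str.len name)) none).toList = u.toList.drop name.length := by
  simp [PySem.Str.slice, PySem.Str.len, PySem.List.slice_from_natCast]

-- taken prefix length i ⟺ the prefix name[:i] is used (for 0 ≤ i ≤ len(name))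
theorem lens_iff (name : String) (used : List String) (i : Nat) (hi : i ≤ name.length) :
    ((i : Int) ∈ (altIndex name used).1) ↔ PySem.Str.slice name none (some (i : Int)) ∈ used := by
  rw [mem_altIndex_fst]
  constructor
  · rintro ⟨u, hu, hpre, hlen⟩
    rw [PySem.Str.startswith_eq, PySem.Chars.startswith_iff] at hpre
    have hlu : u.toList.length = i := by
      rw [PySem.Str.len_eq] at hlen
      omega
    have : u.toList = name.toList.take i := by
      rw [← hlu]
      exact List.prefix_iff_eq_take.mp hpre
    have : PySem.Str.slice name none (some (i : Int)) = u :=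
      String.toList_inj.mp (by rw [slice_toList, this])
    rwa [this]
  · intro h
    refine ⟨_, h, ?_, ?_⟩
    · rw [PySem.Str.startswith_eq, PySem.Chars.startswith_iff, slice_toList]
      simpa using List.take_prefix i name.toList
    · rw [PySem.Str.len_eq, slice_toList]
      simp [hi]

-- taken suffix s ⟺ name+s is used
theorem suffix_iff (name : String) (used : List String) (s : String) :
    (s ∈ (altIndex name used).2) ↔ (name ++ s) ∈ used := by
  rw [mem_altIndex_snd]
  constructor
  · rintro ⟨u, hu, hpre, rfl⟩
    rw [PySem.Str.startswith_eq, PySem.Chars.startswith_iff] at hpre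
    obtain ⟨t, ht⟩ := hpre
    have : name ++ PySem.Str.slice u (some (PySem.Str.len name)) none = u := by
      apply String.toList_inj.mp
      rw [String.toList_append, sliceFrom_toList, ← ht,
        List.drop_left' (by simp)]
    rwa [this]
  · intro h
    refine ⟨name ++ s, h, ?_, ?_⟩
    · rw [PySem.Str.startswith_eq, PySem.Chars.startswith_iff, String.toList_append]
      exact ⟨s.toList, rfl⟩
    · apply String.toList_inj.mp
      rw [sliceFrom_toList, String.toList_append]
      rw [List.drop_left' (by simp)]

-- A's second loop, after its first (always-taken-in-context) step, is B's numbered search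
theorem cnLoop2_eq_altNum (name : String) (used : List String) (idx : Int) (f : Nat) :
    cnLoop2 name used (name ++ PySem.Int.toStr idx) (idx + 1) f = altNum name (altIndex name used).2 idx f := by
  induction f generalizing idx with
  | zero => simp [cnLoop2, altNum]
  | succ f ih =>
    have hmem : (PySem.Set.contains (altIndex name used).2 (PySem.Int.toStr idx) = true) ↔
        ((name ++ PySem.Int.toStr idx) ∈ used) := by
      rw [PySem.Set.contains_iff, suffix_iff]
    simp only [cnLoop2, altNum]
    by_cases h : (name ++ PySem.Int.toStr idx) ∈ used
    · rw [if_pos h, if_pos (hmem.mpr h)]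
      exact ih (idx + 1)
    · rw [if_neg h, if_neg (fun hc => h (hmem.mp hc))]

-- A's first loop computes find? over the prefix stream from index i
theorem cnLoop1_eq_find (name : String) (used : List String) (i : Nat) :
    cnLoop1 name used i =
      ((PySem.List.pyRange (i : Int) ((name.length : Int) + 1) 1).map
        (fun j => PySem.Str.slice name none (some j))).find? (fun c => !(used.contains c)) := by
  fun_induction cnLoop1 name used i with
  | case1 i hle c hin ih =>
    rw [PySem.List.pyRange_one_cons (by omega)]
    simp only [List.map_cons, List.find?_cons]
    have : (!used.contains c) = false := by simpa using hin
    rw [this]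
    simpa [Int.natCast_add] using ih
  | case2 i hle c hnin =>
    rw [PySem.List.pyRange_one_cons (by omega)]
    simp only [List.map_cons, List.find?_cons]
    have : (!used.contains c) = true := by simpa using hnin
    rw [this]
  | case3 i hgt =>
    rw [PySem.List.pyRange_one_eq_nil (by omega)]
    simp

theorem find?_congr_mem {α : Type} (l : List α) (p q : α → Bool) (h : ∀ a ∈ l, p a = q a) :
    l.find? p = l.find? q := by
  induction l with
  | nil => rfl
  | cons a l ih =>
    simp only [List.find?_cons, h a (by simp)]
    split
    · rfl
    · exact ih (fun a ha => h a (by simp [ha]))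

-- ===== VERDICT =====
theorem create_nickname_spec : Claim_equal_create_nickname := by
  intro name used _
  show create_nickname name used = create_nickname_alt name used
  have hpred : ∀ j ∈ PySem.List.pyRange 1 ((name.length : Int) + 1) 1,
      ((fun c => !(used.contains c)) ∘ (fun j => PySem.Str.slice name none (some j))) j =
        (fun i => !(PySem.Set.contains (altIndex name used).1 i)) j := by
    intro j hj
    rw [PySem.List.mem_pyRange_one] at hj
    obtain ⟨k, hk, rfl⟩ : ∃ k : Nat, k ≤ name.length ∧ (k : Int) = j := ⟨j.toNat, by omega, by omega⟩
    have := lens_iff name used k hk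
    simp only [Function.comp_apply]
    congr 1
    rw [Bool.eq_iff_iff, List.contains_iff_mem, PySem.Set.contains_iff]
    exact this.symm
  have hA : create_nickname name used =
      match (PySem.List.pyRange 1 ((name.length : Int) + 1) 1).find?
          (fun i => !(PySem.Set.contains (altIndex name used).1 i)) with
      | some i => PySem.Str.slice name none (some i)
      | none => cnLoop2 name used name 2 (used.length + 1) := by
    unfold create_nickname
    rw [cnLoop1_eq_find name used 1, Nat.cast_one, List.find?_map,
      find?_congr_mem _ _ _ hpred]
    cases (PySem.List.pyRange 1 ((name.length : Int) + 1) 1).find?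
        (fun i => !(PySem.Set.contains (altIndex name used).1 i)) <;> rfl
  have hB : create_nickname_alt name used =
      match (PySem.List.pyRange 1 ((name.length : Int) + 1) 1).find?
          (fun i => !(PySem.Set.contains (altIndex name used).1 i)) with
      | some i => PySem.Str.slice name none (some i)
      | none =>
          if PySem.Set.contains (altIndex name used).2 "" then
            altNum name (altIndex name used).2 2 used.length
          else name := by
    unfold create_nickname_alt
    rw [show PySem.Str.len name = (name.length : Int) from by
      rw [PySem.Str.len_eq, String.length_toList]]
  rw [hA, hB]
  cases hf : (PySem.List.pyRange 1 ((name.length : Int) + 1) 1).find?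
      (fun i => !(PySem.Set.contains (altIndex name used).1 i)) with
  | some i => rfl
  | none =>
    have hname : (PySem.Set.contains (altIndex name used).2 "" = true) ↔ (name ∈ used) := by
      rw [PySem.Set.contains_iff, suffix_iff]
      simp
    simp only [cnLoop2]
    by_cases h : name ∈ used
    · rw [if_pos h, if_pos (hname.mpr h)]
      exact cnLoop2_eq_altNum name used 2 used.length
    · rw [if_neg h, if_neg (fun hc => h (hname.mp hc))]
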